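-- pv_equiv track=rewrite | github.com/anna-pmm/anna_mena_uide_ahorcado2026 | ahorcadoam.py | inicializar_progreso
-- ===== SOURCE A (Python) =====
-- def inicializar_progreso(palabra):
--     progreso = []
--     i = 0
--     while i < len(palabra):
--         if i == 0 or i == len(palabra) - 1:
--             progreso.append(palabra[i])
--         else:
--             progreso.append("_")
--         i = i + 1
--     return progreso
-- ===== SOURCE B (Python) =====
-- def inicializar_progreso(palabra):
--     if not palabra:
--         return []
--     if len(palabra) == 1:
--         return [palabra]
--     return [palabra[0]] + ["_"] * (len(palabra) - 2) + [palabra[-1]]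
-- ===== Notes on version B (the rewrite author's own statement) =====
-- stated objective: simpler
-- what changed: Replaces the index loop with per-position endpoint tests by a case split on word length and one concatenation of three segments: [first letter] + underscores for the middle + [last letter].
import Mathlib
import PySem

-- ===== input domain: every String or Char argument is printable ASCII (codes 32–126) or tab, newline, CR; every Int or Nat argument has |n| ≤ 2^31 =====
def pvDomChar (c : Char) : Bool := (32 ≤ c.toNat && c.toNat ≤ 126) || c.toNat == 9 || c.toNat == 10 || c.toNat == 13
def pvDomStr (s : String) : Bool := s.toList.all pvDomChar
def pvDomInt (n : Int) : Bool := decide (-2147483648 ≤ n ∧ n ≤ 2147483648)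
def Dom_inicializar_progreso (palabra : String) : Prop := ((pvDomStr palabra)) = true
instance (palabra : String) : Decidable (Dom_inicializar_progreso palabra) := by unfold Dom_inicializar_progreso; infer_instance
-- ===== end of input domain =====

-- B replaces A's index loop by a length case split and one concatenation [first] ++ middle underscores ++ [last]; simpler decomposition, same O(n).

-- ===== PORT A =====
-- while loop: i counts up, appending either the endpoint letter or "_"
def pvALoop (cs : List Char) (n : Nat) (i : Nat) (acc : List String) : List String :=
  if i < n then
    pvALoop cs n (i + 1)
      (acc ++ [if i = 0 ∨ i = n - 1 then String.singleton (cs.getD i ' ') else "_"])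
  else acc
termination_by n - i

def inicializar_progreso (palabra : String) : List String :=
  pvALoop palabra.toList palabra.toList.length 0 []

-- ===== PORT B =====
def pvBParts (cs : List Char) : List String :=
  match cs with
  | [] => []
  | [c] => [String.singleton c]
  | c :: rest =>
      [String.singleton c] ++ List.replicate (cs.length - 2) "_"
        ++ [String.singleton ((c :: rest).getLastD ' ')]

def inicializar_progreso_alt (palabra : String) : List String :=
  pvBParts palabra.toList

-- ===== PRECONDITION & SPEC =====
def Spec_inicializar_progreso (palabra : String) (out : List String) : Prop := out = inicializar_progreso_alt palabra
instance (palabra : String) (out : List String) : Decidable (Spec_inicializar_progreso palabra out) := by unfold Spec_inicializar_progreso; infer_instance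

-- ===== CLAIM (what is proved, stated in full; the proofs are below) =====
def Claim_equal_inicializar_progreso : Prop := ∀ (palabra : String), Dom_inicializar_progreso palabra → Spec_inicializar_progreso palabra (inicializar_progreso palabra)

-- ===== LEMMAS AND PROOFS =====

-- element function A's loop realises
def pvCell (cs : List Char) (j : Nat) : String :=
  if j = 0 ∨ j = cs.length - 1 then String.singleton (cs.getD j ' ') else "_"

theorem pvALoop_spec (cs : List Char) (i : Nat) (acc : List String) :
    pvALoop cs cs.length i acc = acc ++ ((List.range cs.length).drop i).map (pvCell cs) := by
  by_cases h : i < cs.length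
  · rw [pvALoop]
    simp only [h, if_pos]
    rw [pvALoop_spec cs (i + 1)]
    have hdrop : (List.range cs.length).drop i = i :: (List.range cs.length).drop (i + 1) := by
      rw [List.drop_eq_getElem_cons (by simpa using h)]
      simp
    rw [hdrop]
    simp [pvCell]
  · rw [pvALoop]
    simp only [h, if_false]
    have : (List.range cs.length).drop i = [] := by
      apply List.drop_eq_nil_of_le
      simpa using Nat.le_of_not_lt h
    simp [this]
termination_by cs.length - i

theorem pvA_map (cs : List Char) :
    pvALoop cs cs.length 0 [] = (List.range cs.length).map (pvCell cs) := by
  simpa using pvALoop_spec cs 0 []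

theorem pv_main (cs : List Char) :
    pvALoop cs cs.length 0 [] = pvBParts cs := by
  rw [pvA_map]
  match cs with
  | [] => simp [pvBParts]
  | [c] => simp [pvBParts, List.range_succ, pvCell]
  | c :: d :: rest =>
      have hB : pvBParts (c :: d :: rest)
          = String.singleton c :: (List.replicate rest.length "_"
              ++ [String.singleton ((c :: d :: rest).getLastD ' ')]) := by
        simp [pvBParts]
      apply List.ext_getElem
      · simp [hB]
      · intro j h1 h2
        simp only [List.length_map, List.length_range] at h1
        simp only [List.getElem_map, List.getElem_range, hB]
        by_cases h0 : j = 0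
        · subst h0; simp [pvCell]
        · have hj1 : 1 ≤ j := Nat.one_le_iff_ne_zero.mpr h0
          have hlen : (c :: d :: rest).length = rest.length + 2 := by simp
          rw [List.getElem_cons]
          rw [dif_neg h0]
          by_cases hlast : j = rest.length + 1
          · subst hlast
            rw [List.getElem_append_right (by simp)]
            have : pvCell (c :: d :: rest) (rest.length + 1)
                = String.singleton ((c :: d :: rest).getD (rest.length + 1) ' ') := by
              simp [pvCell]
            rw [this]
            simp [List.getD_eq_getElem?_getD, List.getLastD_eq_getLast?,
                  List.getLast?_eq_getElem?]
          · have hj2 : j - 1 < rest.length := by omega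
            rw [List.getElem_append_left (by simpa using hj2)]
            simp [pvCell, h0]
            exact fun h => absurd h hlast

-- ===== VERDICT (by name: the statement is the Claim_ definition above) =====
theorem inicializar_progreso_spec : Claim_equal_inicializar_progreso := by
  intro palabra _
  unfold Spec_inicializar_progreso inicializar_progreso inicializar_progreso_alt
  exact pv_main palabra.toList
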